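-- pv_equiv track=rewrite | github.com/Shubham-Aggarwal-1306/CompetetiveProgramming | test.py | find_best_starting_point
-- ===== SOURCE A (Python) =====
-- def find_best_starting_point(n, t):
--     max_complete = 0
--     best_id = 0
--
--     for i in range(n):
--         complete_count = 0
--         for j in range(n):
--             student_id = (i + j) % n
--             if t[student_id] <= j:
--                 complete_count += 1
--
--         if complete_count > max_complete:
--             max_complete = complete_count
--             best_id = i + 1  # IDs are 1-based
--
--     return best_id
-- ===== SOURCE B (Python) =====
-- def find_best_starting_point(n, t):
--     if n <= 0:
--         return 0
--     # diff[k] accumulates, for each student, +1/-1 at the ends of the circular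
--     # interval of starting points i for which that student finishes in time.
--     diff = [0] * (n + 1)
--     for s in range(n):
--         v = t[s]
--         if v <= 0:
--             diff[0] += 1
--             diff[n] -= 1
--         elif v < n:
--             l = (s + 1) % n
--             r = (s - v) % n
--             if l <= r:
--                 diff[l] += 1
--                 diff[r + 1] -= 1
--             else:
--                 diff[0] += 1
--                 diff[r + 1] -= 1
--                 diff[l] += 1
--                 diff[n] -= 1
--     best_id = 0
--     best = 0
--     cur = 0
--     for i in range(n):
--         cur += diff[i]
--         if cur > best:
--             best = cur
--             best_id = i + 1
--     return best_id
-- ===== Notes on version B (the rewrite author's own statement) =====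
-- stated objective: faster
-- what changed: Replaced A's O(n^2) nested loops (recount every start) by an O(n) circular difference array: each student adds +1/-1 at the ends of its arc of good starting points, then one prefix-sum scan picks the first strict maximum.
import Mathlib
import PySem

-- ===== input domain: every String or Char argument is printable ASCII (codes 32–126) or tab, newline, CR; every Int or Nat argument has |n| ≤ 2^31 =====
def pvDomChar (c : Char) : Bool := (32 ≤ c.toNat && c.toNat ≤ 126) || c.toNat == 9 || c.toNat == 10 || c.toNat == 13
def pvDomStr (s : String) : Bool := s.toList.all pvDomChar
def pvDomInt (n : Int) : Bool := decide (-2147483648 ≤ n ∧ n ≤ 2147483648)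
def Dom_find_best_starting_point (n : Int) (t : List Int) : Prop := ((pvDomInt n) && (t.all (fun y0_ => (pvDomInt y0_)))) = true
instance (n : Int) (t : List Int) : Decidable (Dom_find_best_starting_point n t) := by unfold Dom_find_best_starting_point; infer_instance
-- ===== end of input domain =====

-- B replaces A's double loop by a circular difference array (each student
-- contributes +1/-1 at the ends of its arc of good starting points) and a
-- single prefix-sum scan picking the first maximum.

-- ===== PORT A =====
def find_best_starting_point (n : Int) (t : List Int) : Int :=
  ((PySem.List.pyRange 0 n 1).foldl (fun (st : Int × Int) i =>
      let cc := (PySem.List.pyRange 0 n 1).foldl (fun (c : Int) j =>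
          let sid := PySem.Int.mod (i + j) n
          if PySem.List.pyGetD t sid 0 ≤ j then c + 1 else c) 0
      if cc > st.1 then (cc, i + 1) else st) (0, 0)).2

-- ===== PORT B =====
def find_best_starting_point_alt (n : Int) (t : List Int) : Int :=
  if n ≤ 0 then 0
  else
    -- [0] * (n + 1)  (hand port of list repetition; exact here since n + 1 > 0)
    let diff0 : List Int := List.replicate (n.toNat + 1) 0
    let diff := (PySem.List.pyRange 0 n 1).foldl (fun (diff : List Int) s =>
        let v := PySem.List.pyGetD t s 0
        if v ≤ 0 then
          let diff := PySem.List.pySetD diff 0 (PySem.List.pyGetD diff 0 0 + 1)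
          PySem.List.pySetD diff n (PySem.List.pyGetD diff n 0 - 1)
        else if v < n then
          let l := PySem.Int.mod (s + 1) n
          let r := PySem.Int.mod (s - v) n
          if l ≤ r then
            let diff := PySem.List.pySetD diff l (PySem.List.pyGetD diff l 0 + 1)
            PySem.List.pySetD diff (r + 1) (PySem.List.pyGetD diff (r + 1) 0 - 1)
          else
            let diff := PySem.List.pySetD diff 0 (PySem.List.pyGetD diff 0 0 + 1)
            let diff := PySem.List.pySetD diff (r + 1) (PySem.List.pyGetD diff (r + 1) 0 - 1)
            let diff := PySem.List.pySetD diff l (PySem.List.pyGetD diff l 0 + 1)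
            PySem.List.pySetD diff n (PySem.List.pyGetD diff n 0 - 1)
        else diff) diff0
    ((PySem.List.pyRange 0 n 1).foldl (fun (st : Int × Int × Int) i =>
        let cur := st.1 + PySem.List.pyGetD diff i 0
        if cur > st.2.1 then (cur, cur, i + 1) else (cur, st.2.1, st.2.2)) (0, 0, 0)).2.2

-- ===== PRECONDITION & SPEC =====
-- Pre_ excludes exactly the inputs where the Python A raises IndexError: 0 < n but t has fewer than n entries.
def Pre_find_best_starting_point (n : Int) (t : List Int) : Prop := n ≤ 0 ∨ n ≤ (t.length : Int)
instance (n : Int) (t : List Int) : Decidable (Pre_find_best_starting_point n t) := by unfold Pre_find_best_starting_point; infer_instance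
def pvWitness_find_best_starting_point : Int × List Int := (3, [1, 0, 2])

def Spec_find_best_starting_point (n : Int) (t : List Int) (out : Int) : Prop := out = find_best_starting_point_alt n t
instance (n : Int) (t : List Int) (out : Int) : Decidable (Spec_find_best_starting_point n t out) := by unfold Spec_find_best_starting_point; infer_instance

-- ===== CLAIM (what is proved, stated in full; the proofs are below) =====
def Claim_equal_find_best_starting_point : Prop := ∀ (n : Int) (t : List Int), Dom_find_best_starting_point n t → Pre_find_best_starting_point n t → Spec_find_best_starting_point n t (find_best_starting_point n t)

-- ===== LEMMAS AND PROOFS =====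

-- value of t at a (Nat) student index
def tv (t : List Int) (s : Nat) : Int := t.getD s 0

-- per-student contribution to the difference array at position k
def dlt (n : Int) (t : List Int) (s k : Nat) : Int :=
  let v := tv t s
  if v ≤ 0 then (if (k : Int) = 0 then 1 else 0) + (if (k : Int) = n then -1 else 0)
  else if v < n then
    let l := PySem.Int.mod ((s : Int) + 1) n
    let r := PySem.Int.mod ((s : Int) - v) n
    if l ≤ r then (if (k : Int) = l then 1 else 0) + (if (k : Int) = r + 1 then -1 else 0)
    else (if (k : Int) = 0 then 1 else 0) + (if (k : Int) = r + 1 then -1 else 0) +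
         (if (k : Int) = l then 1 else 0) + (if (k : Int) = n then -1 else 0)
  else 0

-- the whole difference array as a function of the position
def diffSum (n : Int) (t : List Int) (k : Nat) : Int :=
  ((List.range n.toNat).map (fun s => dlt n t s k)).sum

-- prefix sums of the difference array = B's running counter at start i
def pre (n : Int) (t : List Int) (i : Nat) : Int :=
  ((List.range (i + 1)).map (fun k => diffSum n t k)).sum

-- indicator: student s finishes when the round starts at i
def arc (n : Int) (t : List Int) (s i : Nat) : Int :=
  if tv t s ≤ ((s : Int) - (i : Int)) % n then 1 else 0

-- A's inner-loop count for start i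
def cnt (n : Int) (t : List Int) (i : Nat) : Int :=
  ((List.range n.toNat).map (fun j =>
    if tv t ((i + j) % n.toNat) ≤ (j : Int) then (1 : Int) else 0)).sum

-- the shared selection fold (strict improvement, 1-based ids)
def sel (N : Nat) (f : Nat → Int) : Int :=
  ((List.range N).foldl (fun (st : Int × Int) i =>
    if f i > st.1 then (f i, (i : Int) + 1) else st) (0, 0)).2

-- B's per-student difference-array update, with the loop index as a Nat
def bstepD (n : Int) (t : List Int) (diff : List Int) (s : Nat) : List Int :=
  let v := PySem.List.pyGetD t (s : Int) 0
  if v ≤ 0 then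
    let diff := PySem.List.pySetD diff 0 (PySem.List.pyGetD diff 0 0 + 1)
    PySem.List.pySetD diff n (PySem.List.pyGetD diff n 0 - 1)
  else if v < n then
    let l := PySem.Int.mod ((s : Int) + 1) n
    let r := PySem.Int.mod ((s : Int) - v) n
    if l ≤ r then
      let diff := PySem.List.pySetD diff l (PySem.List.pyGetD diff l 0 + 1)
      PySem.List.pySetD diff (r + 1) (PySem.List.pyGetD diff (r + 1) 0 - 1)
    else
      let diff := PySem.List.pySetD diff 0 (PySem.List.pyGetD diff 0 0 + 1)
      let diff := PySem.List.pySetD diff (r + 1) (PySem.List.pyGetD diff (r + 1) 0 - 1)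
      let diff := PySem.List.pySetD diff l (PySem.List.pyGetD diff l 0 + 1)
      PySem.List.pySetD diff n (PySem.List.pyGetD diff n 0 - 1)
  else diff

lemma getD_set_eq_ite (xs : List Int) (a k : Nat) (v : Int) (ha : a < xs.length) :
    (xs.set a v).getD k 0 = if k = a then v else xs.getD k 0 := by
  by_cases hk : k = a
  · subst hk; simp [List.getD_eq_getElem?_getD, ha]
  · simp [List.getD_eq_getElem?_getD, List.getElem?_set_ne (by omega : a ≠ k), hk]

lemma emod_cases (a x : Int) (_hx : 0 < x) (h1 : -x ≤ a) (h2 : a < 2 * x) :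
    a % x = a ∨ a % x = a - x ∨ a % x = a + x := by
  by_cases h0 : 0 ≤ a
  · by_cases hlt : a < x
    · exact Or.inl (Int.emod_eq_of_lt h0 hlt)
    · refine Or.inr (Or.inl ?_)
      rw [← Int.sub_emod_right a x]
      exact Int.emod_eq_of_lt (by omega) (by omega)
  · refine Or.inr (Or.inr ?_)
    rw [← Int.add_emod_right a x]
    exact Int.emod_eq_of_lt (by omega) (by omega)

lemma nat_mod_two (x N : Nat) (hN : 0 < N) (h : x < 2 * N) :
    x % N = if x < N then x else x - N := by
  by_cases hx : x < N
  · simp [Nat.mod_eq_of_lt hx, hx]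
  · rw [Nat.mod_eq_sub_mod (by omega), Nat.mod_eq_of_lt (by omega)]
    simp [hx]

lemma sum_ind (m : Nat) (a c : Int) :
    ((List.range m).map (fun k : Nat => if (k : Int) = a then c else 0)).sum
      = if 0 ≤ a ∧ a < (m : Int) then c else 0 := by
  induction m with
  | zero => simp [show ¬(0 ≤ a ∧ a < (0 : Int)) from by omega]
  | succ m ih =>
    rw [List.range_succ, List.map_append, List.sum_append, ih]
    simp only [List.map_cons, List.map_nil, List.sum_cons, List.sum_nil]
    push_cast
    split_ifs <;> omega

lemma list_sum_comm (l1 l2 : List Nat) (F : Nat → Nat → Int) :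
    (l1.map (fun a => (l2.map (fun b => F a b)).sum)).sum
      = (l2.map (fun b => (l1.map (fun a => F a b)).sum)).sum := by
  induction l1 with
  | nil => simp
  | cons a l ih => simp [ih, PySem.List.sum_map_add_int]

lemma A_eq_sel (n : Int) (t : List Int) (hn : 0 < n) :
    find_best_starting_point n t = sel n.toNat (cnt n t) := by
  have hN : ((n.toNat : Int)) = n := Int.toNat_of_nonneg hn.le
  unfold find_best_starting_point sel
  conv_lhs => rw [← hN]
  rw [PySem.List.pyRange_zero_natCast, List.foldl_map]
  refine congrArg Prod.snd ?_
  apply PySem.List.foldl_congr_mem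
  intro st i hi
  have hinner : (List.range n.toNat).foldl (fun (c : Int) j =>
      if PySem.List.pyGetD t (PySem.Int.mod (((i : Nat) : Int) + ((j : Nat) : Int)) ((n.toNat : Nat) : Int)) 0 ≤ ((j : Nat) : Int) then c + 1 else c) 0
      = cnt n t i := by
    have hstep : ∀ (c : Int) (j : Nat), j ∈ List.range n.toNat →
        (if PySem.List.pyGetD t (PySem.Int.mod (((i : Nat) : Int) + ((j : Nat) : Int)) ((n.toNat : Nat) : Int)) 0 ≤ ((j : Nat) : Int) then c + 1 else c)
        = (if tv t ((i + j) % n.toNat) ≤ ((j : Nat) : Int) then c + 1 else c) := by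
      intro c j hj
      have hm : PySem.Int.mod (((i : Nat) : Int) + ((j : Nat) : Int)) ((n.toNat : Nat) : Int)
          = (((i + j) % n.toNat : Nat) : Int) := by
        rw [PySem.Int.mod_eq_emod_of_pos (by rw [hN]; exact hn)]
        push_cast
        rfl
      rw [hm, PySem.List.pyGetD_natCast]
      rfl
    rw [PySem.List.foldl_congr_mem _ _ _ _ hstep]
    rw [PySem.List.foldl_ite_add_one]
    unfold cnt
    simp [← PySem.List.sum_map_ite_one_zero]
  simp only [List.foldl_map, hinner]

lemma upd_inc (xs : List Int) (a : Int) (k : Nat) (h0 : 0 ≤ a) (ha : a.toNat < xs.length) :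
    (xs.set a.toNat (xs.getD a.toNat 0 + 1)).getD k 0
      = xs.getD k 0 + (if (k : Int) = a then 1 else 0) := by
  by_cases hk : k = a.toNat
  · subst hk
    rw [getD_set_eq_ite _ _ _ _ ha, if_pos rfl, if_pos (by omega)]
  · rw [getD_set_eq_ite _ _ _ _ ha, if_neg hk, if_neg (by omega), add_zero]

lemma upd_dec (xs : List Int) (a : Int) (k : Nat) (h0 : 0 ≤ a) (ha : a.toNat < xs.length) :
    (xs.set a.toNat (xs.getD a.toNat 0 - 1)).getD k 0
      = xs.getD k 0 + (if (k : Int) = a then -1 else 0) := by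
  by_cases hk : k = a.toNat
  · subst hk
    rw [getD_set_eq_ite _ _ _ _ ha, if_pos rfl, if_pos (by omega)]
    ring
  · rw [getD_set_eq_ite _ _ _ _ ha, if_neg hk, if_neg (by omega), add_zero]

lemma diff_step (n : Int) (t : List Int) (hn : 0 < n) (diff : List Int)
    (hlen : diff.length = n.toNat + 1) (s : Nat) :
    (bstepD n t diff s).length = n.toNat + 1 ∧
      ∀ k : Nat, (bstepD n t diff s).getD k 0 = diff.getD k 0 + dlt n t s k := by
  have hvt : PySem.List.pyGetD t (s : Int) 0 = tv t s := PySem.List.pyGetD_natCast t s 0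
  have hl0 := PySem.Int.mod_nonneg ((s : Int) + 1) hn
  have hlN := PySem.Int.mod_lt ((s : Int) + 1) hn
  have hr0 := PySem.Int.mod_nonneg ((s : Int) - tv t s) hn
  have hrN := PySem.Int.mod_lt ((s : Int) - tv t s) hn
  unfold bstepD dlt
  rw [hvt]
  simp only []
  constructor
  · split_ifs <;> simp [PySem.List.length_pySetD, hlen]
  · intro k
    by_cases h1 : tv t s ≤ 0
    · simp only [if_pos h1]
      rw [PySem.List.pySetD_of_nonneg _ _ le_rfl,
          PySem.List.pySetD_of_nonneg _ _ hn.le,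
          PySem.List.pyGetD_of_nonneg _ _ le_rfl,
          PySem.List.pyGetD_of_nonneg _ _ hn.le]
      rw [upd_dec _ _ _ hn.le (by simp only [List.length_set, hlen]; omega),
          upd_inc _ _ _ le_rfl (by simp only [List.length_set, hlen]; omega)]
      ring
    · simp only [if_neg h1]
      by_cases h2 : tv t s < n
      · simp only [if_pos h2]
        by_cases h3 : PySem.Int.mod ((s : Int) + 1) n ≤ PySem.Int.mod ((s : Int) - tv t s) n
        · simp only [if_pos h3]
          rw [PySem.List.pySetD_of_nonneg _ _ hl0,
              PySem.List.pySetD_of_nonneg _ _ (by omega : (0:Int) ≤ PySem.Int.mod ((s : Int) - tv t s) n + 1),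
              PySem.List.pyGetD_of_nonneg _ _ hl0,
              PySem.List.pyGetD_of_nonneg _ _ (by omega : (0:Int) ≤ PySem.Int.mod ((s : Int) - tv t s) n + 1)]
          rw [upd_dec _ _ _ (by omega) (by simp only [List.length_set, hlen]; omega),
              upd_inc _ _ _ hl0 (by simp only [List.length_set, hlen]; omega)]
          ring
        · simp only [if_neg h3]
          rw [PySem.List.pySetD_of_nonneg _ _ le_rfl,
              PySem.List.pySetD_of_nonneg _ _ (by omega : (0:Int) ≤ PySem.Int.mod ((s : Int) - tv t s) n + 1),
              PySem.List.pySetD_of_nonneg _ _ hl0,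
              PySem.List.pySetD_of_nonneg _ _ hn.le,
              PySem.List.pyGetD_of_nonneg _ _ le_rfl,
              PySem.List.pyGetD_of_nonneg _ _ (by omega : (0:Int) ≤ PySem.Int.mod ((s : Int) - tv t s) n + 1),
              PySem.List.pyGetD_of_nonneg _ _ hl0,
              PySem.List.pyGetD_of_nonneg _ _ hn.le]
          rw [upd_dec _ _ _ hn.le (by simp only [List.length_set, hlen]; omega),
              upd_inc _ _ _ hl0 (by simp only [List.length_set, hlen]; omega),
              upd_dec _ _ _ (by omega) (by simp only [List.length_set, hlen]; omega),
              upd_inc _ _ _ le_rfl (by simp only [List.length_set, hlen]; omega)]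
          ring
      · simp only [if_neg h2]
        omega

lemma diff_inv (n : Int) (t : List Int) (hn : 0 < n) (m : Nat) :
    ((List.range m).foldl (bstepD n t) (List.replicate (n.toNat + 1) 0)).length = n.toNat + 1 ∧
      ∀ k : Nat, ((List.range m).foldl (bstepD n t) (List.replicate (n.toNat + 1) 0)).getD k 0
        = ((List.range m).map (fun s => dlt n t s k)).sum := by
  induction m with
  | zero => simp [List.getD_eq_getElem?_getD]
  | succ m ih =>
    rw [List.range_succ, List.foldl_append, List.foldl_cons, List.foldl_nil]
    obtain ⟨ihl, ihv⟩ := ih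
    obtain ⟨hl, hv⟩ := diff_step n t hn _ ihl m
    refine ⟨hl, fun k => ?_⟩
    rw [hv k, ihv k, List.map_append, List.sum_append]
    simp

lemma scan_aux (dF : Nat → Int) (st0 : Int × Int) (m : Nat) :
    (List.range m).foldl (fun (st : Int × Int × Int) k =>
        let cur := st.1 + dF k
        if cur > st.2.1 then (cur, cur, (k : Int) + 1) else (cur, st.2.1, st.2.2)) (0, st0)
      = (((List.range m).map dF).sum,
         (List.range m).foldl (fun (st : Int × Int) k =>
           if ((List.range (k + 1)).map dF).sum > st.1
           then (((List.range (k + 1)).map dF).sum, (k : Int) + 1) else st) st0) := by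
  induction m with
  | zero => simp
  | succ m ih =>
    rw [List.range_succ, List.foldl_append, List.foldl_append, ih,
        List.foldl_cons, List.foldl_nil, List.foldl_cons, List.foldl_nil]
    have hsum : ((List.range (m + 1)).map dF).sum = ((List.range m).map dF).sum + dF m := by
      rw [List.range_succ, List.map_append, List.sum_append]; simp
    simp only [hsum, List.map_append, List.sum_append, List.map_cons, List.map_nil,
      List.sum_cons, List.sum_nil, add_zero]
    split_ifs <;> simp

lemma B_eq_sel (n : Int) (t : List Int) (hn : 0 < n) :
    find_best_starting_point_alt n t = sel n.toNat (pre n t) := by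
  have hN : ((n.toNat : Int)) = n := Int.toNat_of_nonneg hn.le
  obtain ⟨hDlen, hDval⟩ := diff_inv n t hn n.toNat
  have hrange : PySem.List.pyRange 0 n 1 = (List.range n.toNat).map (fun k : Nat => (k : Int)) := by
    conv_lhs => rw [← hN, PySem.List.pyRange_zero_natCast]
  unfold find_best_starting_point_alt
  rw [if_neg (by omega)]
  have hport : (PySem.List.pyRange 0 n 1).foldl (fun (diff : List Int) s =>
        let v := PySem.List.pyGetD t s 0
        if v ≤ 0 then
          let diff := PySem.List.pySetD diff 0 (PySem.List.pyGetD diff 0 0 + 1)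
          PySem.List.pySetD diff n (PySem.List.pyGetD diff n 0 - 1)
        else if v < n then
          let l := PySem.Int.mod (s + 1) n
          let r := PySem.Int.mod (s - v) n
          if l ≤ r then
            let diff := PySem.List.pySetD diff l (PySem.List.pyGetD diff l 0 + 1)
            PySem.List.pySetD diff (r + 1) (PySem.List.pyGetD diff (r + 1) 0 - 1)
          else
            let diff := PySem.List.pySetD diff 0 (PySem.List.pyGetD diff 0 0 + 1)
            let diff := PySem.List.pySetD diff (r + 1) (PySem.List.pyGetD diff (r + 1) 0 - 1)
            let diff := PySem.List.pySetD diff l (PySem.List.pyGetD diff l 0 + 1)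
            PySem.List.pySetD diff n (PySem.List.pyGetD diff n 0 - 1)
        else diff) (List.replicate (n.toNat + 1) 0)
      = (List.range n.toNat).foldl (bstepD n t) (List.replicate (n.toNat + 1) 0) := by
    rw [hrange, List.foldl_map]
    rfl
  simp only [hport]
  have hget : ∀ (st : Int × Int × Int) (k : Nat), k ∈ List.range n.toNat →
      (fun (st : Int × Int × Int) (k : Nat) =>
        let cur := st.1 + PySem.List.pyGetD
          ((List.range n.toNat).foldl (bstepD n t) (List.replicate (n.toNat + 1) 0)) ((k : Nat) : Int) 0
        if cur > st.2.1 then (cur, cur, ((k : Nat) : Int) + 1) else (cur, st.2.1, st.2.2)) st k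
      = (fun (st : Int × Int × Int) (k : Nat) =>
        let cur := st.1 + diffSum n t k
        if cur > st.2.1 then (cur, cur, ((k : Nat) : Int) + 1) else (cur, st.2.1, st.2.2)) st k := by
    intro st k hk
    simp only [PySem.List.pyGetD_natCast, hDval k]
    rfl
  rw [hrange, List.foldl_map]
  rw [PySem.List.foldl_congr_mem _ _ _ _ hget]
  rw [scan_aux (diffSum n t) (0, 0) n.toNat]
  rfl

set_option maxHeartbeats 1000000 in
lemma dlt_prefix (n : Int) (t : List Int) (hn : 0 < n) (s i : Nat)
    (hs : s < n.toNat) (hi : i < n.toNat) :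
    ((List.range (i + 1)).map (fun k => dlt n t s k)).sum = arc n t s i := by
  have hs' : (s : Int) < n := by omega
  have hi' : (i : Int) < n := by omega
  have hj0 : 0 ≤ ((s : Int) - (i : Int)) % n := Int.emod_nonneg _ (by omega)
  have hjN : ((s : Int) - (i : Int)) % n < n := Int.emod_lt_of_pos _ hn
  have hjc := emod_cases ((s : Int) - (i : Int)) n hn (by omega) (by omega)
  unfold dlt arc
  by_cases h1 : tv t s ≤ 0
  · simp only [if_pos h1]
    rw [PySem.List.sum_map_add_int, sum_ind, sum_ind]
    push_cast
    simp only [true_and]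
    rcases hjc with hJ | hJ | hJ <;> split_ifs <;> omega
  · simp only [if_neg h1]
    by_cases h2 : tv t s < n
    · simp only [if_pos h2]
      have hL0 := PySem.Int.mod_nonneg ((s : Int) + 1) hn
      have hLN := PySem.Int.mod_lt ((s : Int) + 1) hn
      have hR0 := PySem.Int.mod_nonneg ((s : Int) - tv t s) hn
      have hRN := PySem.Int.mod_lt ((s : Int) - tv t s) hn
      have hLe : PySem.Int.mod ((s : Int) + 1) n = ((s : Int) + 1) % n :=
        PySem.Int.mod_eq_emod_of_pos hn
      have hRe : PySem.Int.mod ((s : Int) - tv t s) n = ((s : Int) - tv t s) % n :=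
        PySem.Int.mod_eq_emod_of_pos hn
      have hLc := emod_cases ((s : Int) + 1) n hn (by omega) (by omega)
      have hRc := emod_cases ((s : Int) - tv t s) n hn (by omega) (by omega)
      rw [← hLe] at hLc
      rw [← hRe] at hRc
      by_cases h3 : PySem.Int.mod ((s : Int) + 1) n ≤ PySem.Int.mod ((s : Int) - tv t s) n
      · simp only [if_pos h3]
        rw [PySem.List.sum_map_add_int, sum_ind, sum_ind]
        push_cast
        rcases hLc with hL | hL | hL <;> rcases hRc with hR | hR | hR <;>
          rcases hjc with hJ | hJ | hJ <;> split_ifs <;> omega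
      · simp only [if_neg h3]
        rw [PySem.List.sum_map_add_int, PySem.List.sum_map_add_int,
            PySem.List.sum_map_add_int, sum_ind, sum_ind, sum_ind, sum_ind]
        push_cast
        simp only [true_and]
        rcases hLc with hL | hL | hL <;> rcases hRc with hR | hR | hR <;>
          rcases hjc with hJ | hJ | hJ <;> split_ifs <;> omega
    · simp only [if_neg h2]
      rw [if_neg (by omega)]
      simp

lemma pre_eq_arcsum (n : Int) (t : List Int) (hn : 0 < n) (i : Nat) (hi : i < n.toNat) :
    pre n t i = ((List.range n.toNat).map (fun s => arc n t s i)).sum := by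
  unfold pre diffSum
  rw [list_sum_comm]
  refine congrArg List.sum (List.map_congr_left ?_)
  intro s hs
  exact dlt_prefix n t hn s i (List.mem_range.mp hs) hi

lemma cnt_eq_arcsum (n : Int) (t : List Int) (hn : 0 < n) (i : Nat) (hi : i < n.toNat) :
    cnt n t i = ((List.range n.toNat).map (fun s => arc n t s i)).sum := by
  have hN : ((n.toNat : Int)) = n := Int.toNat_of_nonneg hn.le
  have hNpos : 0 < n.toNat := by omega
  have hinj : ∀ j1 ∈ List.range n.toNat, ∀ j2 ∈ List.range n.toNat,
      (i + j1) % n.toNat = (i + j2) % n.toNat → j1 = j2 := by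
    intro j1 h1 j2 h2 h
    rw [List.mem_range] at h1 h2
    rw [nat_mod_two _ _ hNpos (by omega), nat_mod_two _ _ hNpos (by omega)] at h
    split_ifs at h <;> omega
  have hmem : ∀ x, x ∈ (List.range n.toNat).map (fun j => (i + j) % n.toNat)
      ↔ x ∈ List.range n.toNat := by
    intro x
    simp only [List.mem_map, List.mem_range]
    constructor
    · rintro ⟨j, hj, rfl⟩
      exact Nat.mod_lt _ hNpos
    · intro hx
      refine ⟨(x + n.toNat - i) % n.toNat, Nat.mod_lt _ hNpos, ?_⟩
      rw [nat_mod_two (x + n.toNat - i) _ hNpos (by omega)]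
      by_cases hc : x + n.toNat - i < n.toNat
      · rw [if_pos hc, nat_mod_two _ _ hNpos (by omega)]
        split_ifs <;> omega
      · rw [if_neg hc, nat_mod_two _ _ hNpos (by omega)]
        split_ifs <;> omega
  have hperm : ((List.range n.toNat).map (fun j => (i + j) % n.toNat)).Perm
      (List.range n.toNat) :=
    (List.perm_ext_iff_of_nodup (List.Nodup.map_on hinj List.nodup_range)
      List.nodup_range).mpr hmem
  have hsum := (hperm.map (fun s => arc n t s i)).sum_eq
  rw [List.map_map] at hsum
  rw [← hsum]
  unfold cnt
  refine congrArg List.sum (List.map_congr_left ?_)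
  intro j hj
  rw [List.mem_range] at hj
  simp only [Function.comp]
  unfold arc
  have hmod : ((((i + j) % n.toNat : Nat) : Int) - (i : Int)) % n = (j : Int) := by
    rw [nat_mod_two _ _ hNpos (by omega)]
    by_cases hc : i + j < n.toNat
    · rw [if_pos hc]
      have : (((i + j : Nat) : Int)) - (i : Int) = (j : Int) := by push_cast; ring
      rw [this]
      exact Int.emod_eq_of_lt (by omega) (by omega)
    · rw [if_neg hc]
      have : (((i + j - n.toNat : Nat) : Int)) - (i : Int) = (j : Int) - n := by
        rw [Nat.cast_sub (by omega)]
        push_cast [hN]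
        ring
      rw [this, ← hN]
      rw [Int.sub_emod_right]
      exact Int.emod_eq_of_lt (by omega) (by omega)
  rw [hmod]

-- ===== VERDICT (by name: the statement is the Claim_ definition above) =====
theorem find_best_starting_point_spec : Claim_equal_find_best_starting_point := by
  intro n t hdom hpre
  unfold Spec_find_best_starting_point
  by_cases hn : n ≤ 0
  · unfold find_best_starting_point find_best_starting_point_alt
    rw [PySem.List.pyRange_one_eq_nil (by omega)]
    simp [hn]
  · replace hn : 0 < n := by omega
    rw [A_eq_sel n t hn, B_eq_sel n t hn]
    unfold sel
    refine congrArg Prod.snd ?_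
    apply PySem.List.foldl_congr_mem
    intro st i hi
    rw [cnt_eq_arcsum n t hn i (List.mem_range.mp hi),
        ← pre_eq_arcsum n t hn i (List.mem_range.mp hi)]
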